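-- pv_equiv track=rewrite | github.com/davidxiang101/f1tenth-course-labs | race/src/follow_gap.py | findLargestGap
-- ===== SOURCE A (Python) =====
-- def findLargestGap(rangeList):
--     maxSize = 0
--     maxStart = None
--
--     currSize = 0
--     currStart = None
--
--     for i in range(len(rangeList)):
--         if rangeList[i] == 0:
--             if currSize > maxSize:
--                 maxSize = currSize
--                 maxStart = currStart
--             currSize = 0
--             currStart = None
--         else:
--             if currStart == None:
--                 currStart = i
--             currSize += 1
--
--     if currSize > maxSize:
--                 maxSize = currSize
--                 maxStart = currStart
--
--     if maxStart != None:
--         middle = maxStart + (maxSize-1) //  2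
--         return middle
--     else:
--         maxRange = -1
--         maxInd = -1
--         for i in range(len(rangeList)):
--             if rangeList[i] > maxRange:
--                 maxRange = rangeList[i]
--                 maxInd = i
--         return maxInd
-- ===== SOURCE B (Python) =====
-- def findLargestGap(rangeList):
--     # Collect all maximal nonzero runs as (start, length) pairs, then pick
--     # the longest (first on ties) and return its midpoint index.
--     runs = []
--     i, n = 0, len(rangeList)
--     while i < n:
--         if rangeList[i] != 0:
--             j = i
--             while j < n and rangeList[j] != 0:
--                 j += 1
--             runs.append((i, j - i))
--             i = j
--         else:
--             i += 1
--     if runs: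
--         start, size = max(runs, key=lambda r: r[1])
--         return start + (size - 1) // 2
--     # No nonzero run: the list is empty (-1) or consists solely of zeros,
--     # where the first index 0 holds the maximum value.
--     return -1 if not rangeList else 0
-- ===== Notes on version B (the rewrite author's own statement) =====
-- stated objective: alternative
-- what changed: B first materialises the list of (start, length) nonzero runs with an explicit two-level scan, then selects the longest run with a first-wins max and computes its midpoint, replacing A's inline running-max state machine and its separate argmax fallback loop (reached only on all-zero lists, where B returns 0 / -1 directly).
import Mathlib
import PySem

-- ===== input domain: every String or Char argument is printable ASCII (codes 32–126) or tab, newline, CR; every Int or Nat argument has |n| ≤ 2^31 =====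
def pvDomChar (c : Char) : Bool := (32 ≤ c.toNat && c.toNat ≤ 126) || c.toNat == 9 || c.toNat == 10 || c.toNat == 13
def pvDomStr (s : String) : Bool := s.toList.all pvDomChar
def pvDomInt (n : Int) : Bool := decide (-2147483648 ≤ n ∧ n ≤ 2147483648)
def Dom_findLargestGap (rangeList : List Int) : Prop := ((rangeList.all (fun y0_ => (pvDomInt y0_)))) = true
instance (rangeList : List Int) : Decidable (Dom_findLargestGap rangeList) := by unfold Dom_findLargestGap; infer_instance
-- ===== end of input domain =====

-- B builds the explicit list of nonzero runs and picks the longest (first-wins),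
-- instead of A's inline running-max state machine; same O(n) cost (objective: alternative).

-- ===== PORT A =====
-- the main for-loop of A: state (maxSize, maxStart, currSize, currStart), index i;
-- includes A's trailing "if currSize > maxSize" flush at the end of the list
def findLargestGapLoop : List Int → Int → Int → Option Int → Int → Option Int → Int × Option Int
  | [], _, maxSize, maxStart, currSize, currStart =>
      if currSize > maxSize then (currSize, currStart) else (maxSize, maxStart)
  | x :: xs, i, maxSize, maxStart, currSize, currStart =>
      if x = 0 then
        if currSize > maxSize then
          findLargestGapLoop xs (i+1) currSize currStart 0 none
        else
          findLargestGapLoop xs (i+1) maxSize maxStart 0 none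
      else
        match currStart with
        | none => findLargestGapLoop xs (i+1) maxSize maxStart (currSize+1) (some i)
        | some s => findLargestGapLoop xs (i+1) maxSize maxStart (currSize+1) (some s)

-- A's fallback argmax loop (maxRange, maxInd start at -1)
def findLargestGapArgmax : List Int → Int → Int → Int → Int
  | [], _, _, maxInd => maxInd
  | x :: xs, i, maxRange, maxInd =>
      if x > maxRange then findLargestGapArgmax xs (i+1) x i
      else findLargestGapArgmax xs (i+1) maxRange maxInd

def findLargestGap (rangeList : List Int) : Int :=
  match findLargestGapLoop rangeList 0 0 none 0 none with
  | (maxSize, some maxStart) => maxStart + PySem.Int.floordiv (maxSize - 1) 2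
  | (_, none) => findLargestGapArgmax rangeList 0 (-1) (-1)

-- ===== PORT B =====
-- inner while of B: length of the leading nonzero prefix and the remainder
def spanNZ : List Int → Int × List Int
  | [] => (0, [])
  | x :: xs => if x = 0 then (0, x :: xs) else
      let r := spanNZ xs
      (r.1 + 1, r.2)

theorem spanNZ_len : ∀ xs : List Int, (spanNZ xs).2.length ≤ xs.length := by
  intro xs
  induction xs with
  | nil => simp [spanNZ]
  | cons x xs ih =>
      by_cases hx : x = 0 <;> simp [spanNZ, hx] <;> omega

-- outer while of B: collect (start, length) of each maximal nonzero run
def collectRuns : List Int → Int → List (Int × Int)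
  | [], _ => []
  | x :: xs, i =>
      if x = 0 then collectRuns xs (i+1)
      else
        let r := spanNZ xs
        (i, 1 + r.1) :: collectRuns r.2 (i + 1 + r.1)
termination_by xs _ => xs.length
decreasing_by
  · simp
  · have := spanNZ_len xs; simp; omega

-- max(runs, key=size): first run with strictly greatest length
def maxBySize : Int × Int → List (Int × Int) → Int × Int
  | best, [] => best
  | best, r :: rs => if r.2 > best.2 then maxBySize r rs else maxBySize best rs

def findLargestGap_alt (rangeList : List Int) : Int :=
  match collectRuns rangeList 0 with
  | r :: rs =>
      let b := maxBySize r rs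
      b.1 + PySem.Int.floordiv (b.2 - 1) 2
  | [] => if rangeList = [] then -1 else 0

-- ===== PRECONDITION & SPEC =====
def Spec_findLargestGap (rangeList : List Int) (out : Int) : Prop := out = findLargestGap_alt rangeList
instance (rangeList : List Int) (out : Int) : Decidable (Spec_findLargestGap rangeList out) := by unfold Spec_findLargestGap; infer_instance

-- ===== CLAIM (what is proved, stated in full; the proofs are below) =====
def Claim_equal_findLargestGap : Prop := ∀ (rangeList : List Int), Dom_findLargestGap rangeList → Spec_findLargestGap rangeList (findLargestGap rangeList)

-- ===== LEMMAS AND PROOFS =====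

-- running best over a run list, A-style (state is (maxSize, maxStart))
def bestFold : Int × Option Int → List (Int × Int) → Int × Option Int
  | b, [] => b
  | b, (s, k) :: rs => if k > b.1 then bestFold (k, some s) rs else bestFold b rs

theorem spanNZ_nonneg : ∀ xs : List Int, 0 ≤ (spanNZ xs).1 := by
  intro xs
  induction xs with
  | nil => simp [spanNZ]
  | cons x xs ih => by_cases hx : x = 0 <;> simp [spanNZ, hx] <;> omega

-- Characterisation of A's loop by B's run list (both loop shapes at once)
theorem loopChar (xs : List Int) :
    ∀ i ms mst, 0 ≤ ms →
      (findLargestGapLoop xs i ms mst 0 none = bestFold (ms, mst) (collectRuns xs i))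
      ∧ (∀ cs s, 1 ≤ cs →
          findLargestGapLoop xs i ms mst cs (some s) =
            bestFold (ms, mst)
              ((s, cs + (spanNZ xs).1) :: collectRuns (spanNZ xs).2 (i + (spanNZ xs).1))) := by
  induction xs with
  | nil =>
      intro i ms mst hms
      refine ⟨?_, ?_⟩
      · simp [findLargestGapLoop, collectRuns, bestFold]; omega
      · intro cs s hcs
        simp [findLargestGapLoop, spanNZ, collectRuns, bestFold]
  | cons x xs ih =>
      intro i ms mst hms
      refine ⟨?_, ?_⟩
      · by_cases hx : x = 0
        · have h0 : ¬ ((0:Int) > ms) := by omega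
          simpa [findLargestGapLoop, collectRuns, hx, h0] using (ih (i+1) ms mst hms).1
        · have h := (ih (i+1) ms mst hms).2 1 i (le_refl 1)
          simp only [findLargestGapLoop, collectRuns, if_neg hx]
          simpa using h
      · intro cs s hcs
        by_cases hx : x = 0
        · -- run ends here: spanNZ (x::xs) = (0, x::xs)
          simp only [findLargestGapLoop, spanNZ, hx]
          by_cases hgt : cs > ms
          · have h := (ih (i+1) cs (some s) (by omega)).1
            simp [hgt, bestFold, h, collectRuns]
          · have h := (ih (i+1) ms mst hms).1
            simp [hgt, bestFold, h, collectRuns]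
        · -- run continues
          have h := (ih (i+1) ms mst hms).2 (cs+1) s (by omega)
          simp only [findLargestGapLoop, if_neg hx, spanNZ]
          rw [h]
          ring_nf

theorem collectRuns_head_pos : ∀ (xs : List Int) (i : Int) (r : Int × Int) (rs : List (Int × Int)),
    collectRuns xs i = r :: rs → 0 < r.2 := by
  intro xs
  induction xs with
  | nil => intro i r rs h; simp [collectRuns] at h
  | cons x xs ih =>
      intro i r rs h
      by_cases hx : x = 0
      · simp only [collectRuns, if_pos hx] at h
        exact ih (i+1) r rs h
      · simp only [collectRuns, if_neg hx] at h
        have := spanNZ_nonneg xs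
        injection h with h1 _
        rw [← h1]
        simp; omega

theorem bestFold_maxBySize : ∀ (rs : List (Int × Int)) (s k : Int),
    bestFold (k, some s) rs = ((maxBySize (s, k) rs).2, some (maxBySize (s, k) rs).1) := by
  intro rs
  induction rs with
  | nil => intro s k; simp [bestFold, maxBySize]
  | cons r rs ih =>
      intro s k
      by_cases h : r.2 > k
      · simpa [bestFold, maxBySize, h] using ih r.1 r.2
      · simpa [bestFold, maxBySize, h] using ih s k

theorem collectRuns_nil_all_zero : ∀ (xs : List Int) (i : Int),
    collectRuns xs i = [] → ∀ x ∈ xs, x = 0 := by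
  intro xs
  induction xs with
  | nil => intro i _; simp
  | cons x xs ih =>
      intro i h
      by_cases hx : x = 0
      · simp only [collectRuns, if_pos hx] at h
        intro y hy
        rcases List.mem_cons.mp hy with rfl | hy
        · exact hx
        · exact ih (i+1) h y hy
      · simp [collectRuns, hx] at h

theorem argmax_all_zero : ∀ (xs : List Int) (i m ind : Int),
    (∀ x ∈ xs, x = 0) → 0 ≤ m → findLargestGapArgmax xs i m ind = ind := by
  intro xs
  induction xs with
  | nil => intro i m ind _ _; simp [findLargestGapArgmax]
  | cons x xs ih =>
      intro i m ind hall hm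
      have hx : x = 0 := hall x (by simp)
      have hgt : ¬ (x > m) := by omega
      simp only [findLargestGapArgmax, if_neg hgt]
      exact ih (i+1) m ind (fun y hy => hall y (by simp [hy])) hm

-- ===== VERDICT (by name: the statement is the Claim_ definition above) =====
theorem findLargestGap_spec : Claim_equal_findLargestGap := by
  intro rangeList _
  unfold Spec_findLargestGap findLargestGap findLargestGap_alt
  have hmain := (loopChar rangeList 0 0 none (le_refl 0)).1
  cases hruns : collectRuns rangeList 0 with
  | nil =>
      simp only [hruns, bestFold] at hmain
      simp only [hmain]
      cases rangeList with
      | nil => simp [findLargestGapArgmax]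
      | cons x xs =>
          have hall := collectRuns_nil_all_zero (x :: xs) 0 hruns
          have hx : x = 0 := hall x (by simp)
          have harg : findLargestGapArgmax (x :: xs) 0 (-1) (-1) = 0 := by
            have hgt : x > (-1 : Int) := by omega
            simp only [findLargestGapArgmax, if_pos hgt]
            exact argmax_all_zero xs 1 x 0 (fun y hy => hall y (by simp [hy])) (by omega)
          simp [harg]
  | cons r rs =>
      have hk0 : 0 < r.2 := collectRuns_head_pos rangeList 0 r rs hruns
      obtain ⟨s0, k0, hr⟩ : ∃ s0 k0, r = (s0, k0) := ⟨r.1, r.2, rfl⟩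
      subst hr
      simp only [hruns, bestFold] at hmain
      rw [if_pos (by exact hk0)] at hmain
      rw [bestFold_maxBySize rs s0 k0] at hmain
      simp [hmain]
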